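-- pv_equiv track=rewrite | github.com/hunarjain09/NER_NLP | CRF/NER_CRF.py | iscamelcase
-- ===== SOURCE A (Python) =====
-- def iscamelcase(string):
--     non_alpha = [i for i in string if not i.isalpha()]
--     substrings= string.translate({ord(i): ' ' for i in non_alpha}).split(' ')
--     for string in substrings:
--         if not all(char.isupper() for char in string):
--             for idx,i in enumerate(string):
--                 if i.isupper() and idx > 0:
--                     return True
--     return False
-- ===== SOURCE B (Python) =====
-- def iscamelcase(string):
--     # single left-to-right pass; per-word flags, reset at every non-alpha boundary
--     start = True          # next alpha char begins a word
--     seen_nonupper = False # word has a non-uppercase letter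
--     seen_late_upper = False  # word has an uppercase letter past its first position
--     for ch in string:
--         if not ch.isalpha():
--             start = True
--             seen_nonupper = False
--             seen_late_upper = False
--         else:
--             if not ch.isupper():
--                 seen_nonupper = True
--             if ch.isupper() and not start:
--                 seen_late_upper = True
--             start = False
--             if seen_nonupper and seen_late_upper:
--                 return True
--     return False
-- ===== Notes on version B (the rewrite author's own statement) =====
-- stated objective: simpler
-- what changed: Replaces A's non-alpha filter + translate-dict + split + per-word double scan (all-upper check then enumerate) with one left-to-right pass keeping two per-word flags (seen a non-uppercase letter, seen an uppercase letter past the word start) that reset at each non-alpha boundary.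
import Mathlib
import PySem

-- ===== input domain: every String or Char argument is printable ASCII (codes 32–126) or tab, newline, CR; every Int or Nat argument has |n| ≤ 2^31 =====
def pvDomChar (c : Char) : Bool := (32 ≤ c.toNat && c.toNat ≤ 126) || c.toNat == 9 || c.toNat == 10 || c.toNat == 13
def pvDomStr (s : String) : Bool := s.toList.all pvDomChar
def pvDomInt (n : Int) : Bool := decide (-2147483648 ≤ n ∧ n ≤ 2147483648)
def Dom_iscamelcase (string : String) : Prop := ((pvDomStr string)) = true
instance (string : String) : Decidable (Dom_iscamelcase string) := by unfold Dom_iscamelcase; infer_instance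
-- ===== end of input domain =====

-- B is a single per-word-flag pass instead of A's translate-dict + split + per-word rescans; return values proved equal on all inputs.

-- ===== PORT A =====
def iscamelcase (string : String) : Bool :=
  let cs := string.toList
  let nonAlpha := cs.filter (fun i => ! PySem.Chars.isalpha i)
  -- str.translate({ord(i): ' ' for i in non_alpha}): every char occurring in non_alpha is replaced by ' '
  -- (hand port, exact: all table values are ' ', so lookup success is exactly membership in non_alpha)
  let translated := cs.map (fun c => if nonAlpha.contains c then ' ' else c)
  let substrings := PySem.Chars.splitOn translated [' ']
  substrings.any (fun w =>
    if ! (w.all (fun ch => PySem.Chars.isupper ch)) then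
      (PySem.List.enumerate w 0).any (fun p => PySem.Chars.isupper p.2 && decide (0 < p.1))
    else false)

-- ===== PORT B =====
def pvAltLoop : List Char → Bool → Bool → Bool → Bool
  | [], _, _, _ => false
  | c :: rest, start, sn, sl =>
    if ! PySem.Chars.isalpha c then
      pvAltLoop rest true false false
    else
      let sn' := sn || ! PySem.Chars.isupper c
      let sl' := sl || (PySem.Chars.isupper c && ! start)
      if sn' && sl' then true else pvAltLoop rest false sn' sl'

def iscamelcase_alt (string : String) : Bool :=
  pvAltLoop string.toList true false false

-- ===== PRECONDITION & SPEC =====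
def Spec_iscamelcase (string : String) (out : Bool) : Prop := out = iscamelcase_alt string
instance (string : String) (out : Bool) : Decidable (Spec_iscamelcase string out) := by unfold Spec_iscamelcase; infer_instance

-- ===== CLAIM (what is proved, stated in full; the proofs are below) =====
def Claim_equal_iscamelcase : Prop := ∀ (string : String), Dom_iscamelcase string → Spec_iscamelcase string (iscamelcase string)

-- ===== LEMMAS AND PROOFS =====

-- the per-word condition A tests: some non-uppercase char, and some uppercase char past position 0
def pvWordP (w : List Char) : Bool :=
  (! w.all (fun ch => PySem.Chars.isupper ch)) && (w.drop 1).any (fun ch => PySem.Chars.isupper ch)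

-- split on a single ' ' as a structural recursion (proved equal to PySem.Chars.splitOn below)
def pvSplitSp (pre : List Char) : List Char → List (List Char)
  | [] => [pre]
  | c :: rest => if c = ' ' then pre :: pvSplitSp [] rest else pvSplitSp (pre ++ [c]) rest

theorem pvGoSpec : ∀ (fuel : Nat) (l cur : List Char) (acc : List (List Char)), l.length < fuel →
    PySem.Chars.splitOn.go [' '] fuel l cur acc = acc.reverse ++ pvSplitSp cur.reverse l := by
  intro fuel
  induction fuel with
  | zero => intro l cur acc h; omega
  | succ f ih =>
    intro l cur acc h
    cases l with
    | nil => simp [PySem.Chars.splitOn.go, pvSplitSp]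
    | cons c rest =>
      by_cases hc : c = ' '
      · subst hc
        rw [show PySem.Chars.splitOn.go [' '] (f+1) (' ' :: rest) cur acc
              = PySem.Chars.splitOn.go [' '] f rest [] (cur.reverse :: acc) by
            simp [PySem.Chars.splitOn.go, List.isPrefixOf]]
        rw [ih rest [] (cur.reverse :: acc) (by simpa using Nat.lt_of_succ_lt_succ h)]
        simp [pvSplitSp]
      · have hc2 : ¬ (' ' = c) := fun hx => hc hx.symm
        rw [show PySem.Chars.splitOn.go [' '] (f+1) (c :: rest) cur acc
              = PySem.Chars.splitOn.go [' '] f rest (c :: cur) acc by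
            simp [PySem.Chars.splitOn.go, List.isPrefixOf, hc2]]
        rw [ih rest (c :: cur) acc (by simpa using Nat.lt_of_succ_lt_succ h)]
        simp [pvSplitSp, hc]

theorem pvSplitOn_eq (l : List Char) : PySem.Chars.splitOn l [' '] = pvSplitSp [] l := by
  show PySem.Chars.splitOn.go [' '] (l.length + 1) l [] [] = pvSplitSp [] l
  simpa using pvGoSpec (l.length + 1) l [] [] (by omega)

theorem pvEnumAny (w : List Char) (s : Int) (hs : 1 ≤ s) :
    (PySem.List.enumerate w s).any (fun p => PySem.Chars.isupper p.2 && decide (0 < p.1))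
      = w.any (fun ch => PySem.Chars.isupper ch) := by
  induction w generalizing s with
  | nil => simp [PySem.List.enumerate_nil]
  | cons c rest ih =>
    rw [PySem.List.enumerate_cons]
    simp only [List.any_cons]
    rw [ih (s + 1) (by omega)]
    have hpos : decide (0 < s) = true := by simp; omega
    simp [hpos]

theorem pvWordA_eq (w : List Char) :
    (if ! (w.all (fun ch => PySem.Chars.isupper ch)) then
        (PySem.List.enumerate w 0).any (fun p => PySem.Chars.isupper p.2 && decide (0 < p.1))
      else false) = pvWordP w := by
  cases w with
  | nil => simp [pvWordP]
  | cons c rest =>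
    rw [PySem.List.enumerate_cons]
    simp only [List.any_cons]
    rw [pvEnumAny rest (0 + 1) (by omega)]
    simp only [pvWordP, List.drop_succ_cons, List.drop_zero]
    cases h : (c :: rest).all (fun ch => PySem.Chars.isupper ch) <;> simp [h]

theorem pvWordP_mono (p q : List Char) (h : pvWordP p = true) : pvWordP (p ++ q) = true := by
  unfold pvWordP at h ⊢
  simp only [Bool.and_eq_true] at h ⊢
  obtain ⟨h1, h2⟩ := h
  have hp : 1 ≤ p.length := by
    cases p with
    | nil => simp at h2
    | cons a as => simp
  rw [List.drop_append_of_le_length hp]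
  constructor
  · simp at h1 ⊢
    obtain ⟨x, hx, hux⟩ := h1
    exact Or.inl ⟨x, hx, hux⟩
  · simp [List.drop_one] at h2 ⊢
    obtain ⟨x, hx, hux⟩ := h2
    exact Or.inl ⟨x, hx, hux⟩

theorem pvSplitSp_any_of_pre (l : List Char) (pre : List Char) (h : pvWordP pre = true) :
    (pvSplitSp pre l).any pvWordP = true := by
  induction l generalizing pre with
  | nil => simpa [pvSplitSp]
  | cons c rest ih =>
    by_cases hc : c = ' '
    · simp [pvSplitSp, hc, h]
    · simp only [pvSplitSp, if_neg hc]
      exact ih (pre ++ [c]) (pvWordP_mono pre [c] h)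

-- translate applied to the full string: alpha chars kept, everything else becomes ' '
def pvMark (c : Char) : Char := if PySem.Chars.isalpha c then c else ' '

theorem pvMainLoop : ∀ (cs pre : List Char), pvWordP pre = false →
    pvAltLoop cs pre.isEmpty (pre.any (fun c => ! PySem.Chars.isupper c))
        ((pre.drop 1).any (fun c => PySem.Chars.isupper c))
      = (pvSplitSp pre (cs.map pvMark)).any pvWordP := by
  intro cs
  induction cs with
  | nil =>
    intro pre h
    simp [pvAltLoop, pvSplitSp, h]
  | cons c rest ih =>
    intro pre h
    by_cases ha : PySem.Chars.isalpha c = true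
    · have hc' : pvMark c = c := by simp [pvMark, ha]
      have hne : ¬ (c = ' ') := fun hcc => by subst hcc; exact absurd ha (by decide)
      simp only [List.map_cons, hc', pvSplitSp, if_neg hne]
      rw [pvAltLoop]
      simp only [ha, Bool.not_true, Bool.false_eq_true, if_false]
      have hsn : (pre.any (fun c => ! PySem.Chars.isupper c) || ! PySem.Chars.isupper c)
          = (pre ++ [c]).any (fun c => ! PySem.Chars.isupper c) := by simp
      have hsl : ((pre.drop 1).any (fun c => PySem.Chars.isupper c)
            || (PySem.Chars.isupper c && ! pre.isEmpty))
          = ((pre ++ [c]).drop 1).any (fun c => PySem.Chars.isupper c) := by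
        cases pre with
        | nil => simp
        | cons p ps => simp
      have hall : (! (pre ++ [c]).all (fun ch => PySem.Chars.isupper ch))
          = (pre.any (fun c => ! PySem.Chars.isupper c) || ! PySem.Chars.isupper c) := by
        simp [List.all_append, Bool.not_and, List.any_eq_not_all_not]
      by_cases hw : pvWordP (pre ++ [c]) = true
      · have : ((pre.any (fun c => ! PySem.Chars.isupper c) || ! PySem.Chars.isupper c)
            && ((pre.drop 1).any (fun c => PySem.Chars.isupper c)
                || (PySem.Chars.isupper c && ! pre.isEmpty))) = true := by
          rw [hsn, hsl]
          unfold pvWordP at hw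
          rw [hall, hsn] at hw
          exact hw
        simp only [this, if_true]
        exact (pvSplitSp_any_of_pre (rest.map pvMark) (pre ++ [c]) hw).symm
      · have hwf : pvWordP (pre ++ [c]) = false := by
          cases hval : pvWordP (pre ++ [c]) with
          | true => exact absurd hval hw
          | false => rfl
        have hcond : ((pre.any (fun c => ! PySem.Chars.isupper c) || ! PySem.Chars.isupper c)
            && ((pre.drop 1).any (fun c => PySem.Chars.isupper c)
                || (PySem.Chars.isupper c && ! pre.isEmpty))) = false := by
          rw [hsn, hsl]
          unfold pvWordP at hwf
          rw [hall, hsn] at hwf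
          exact hwf
        simp only [hcond, Bool.false_eq_true, if_false]
        have := ih (pre ++ [c]) hwf
        rw [show (pre ++ [c]).isEmpty = false by simp] at this
        rw [hsn, hsl]
        exact this
    · have hc' : pvMark c = ' ' := by simp [pvMark, ha]
      simp only [List.map_cons, hc', pvSplitSp]
      rw [pvAltLoop]
      simp only [ha, Bool.not_false, if_true]
      rw [List.any_cons, h, Bool.false_or]
      have := ih ([] : List Char) (by simp [pvWordP])
      simpa using this

theorem pvTranslate_eq (cs : List Char) :
    cs.map (fun c => if (cs.filter (fun i => ! PySem.Chars.isalpha i)).contains c then ' ' else c)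
      = cs.map pvMark := by
  apply List.map_congr_left
  intro c hc
  cases ha : PySem.Chars.isalpha c with
  | true =>
    have hcf : (cs.filter (fun i => ! PySem.Chars.isalpha i)).contains c = false := by
      simp only [List.contains_eq_mem, decide_eq_false_iff_not, List.mem_filter]
      rintro ⟨-, hb⟩
      simp [ha] at hb
    rw [hcf]
    simp [pvMark, ha]
  | false =>
    have hct : (cs.filter (fun i => ! PySem.Chars.isalpha i)).contains c = true := by
      simp only [List.contains_eq_mem, decide_eq_true_eq, List.mem_filter]
      exact ⟨hc, by simp [ha]⟩
    rw [hct]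
    simp [pvMark, ha]

-- ===== VERDICT (by name: the statement is the Claim_ definition above) =====
theorem iscamelcase_spec : Claim_equal_iscamelcase := by
  intro string _
  unfold Spec_iscamelcase iscamelcase iscamelcase_alt
  simp only []
  rw [pvTranslate_eq, pvSplitOn_eq]
  have hA : (fun w =>
        if ! (w.all (fun ch => PySem.Chars.isupper ch)) then
          (PySem.List.enumerate w 0).any (fun p => PySem.Chars.isupper p.2 && decide (0 < p.1))
        else false) = pvWordP := funext pvWordA_eq
  rw [hA]
  have := pvMainLoop string.toList [] (by simp [pvWordP])
  simpa using this.symm
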